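-- pv_equiv track=rewrite | github.com/mohamedfouadhanani/insight | evaluation.py | get_sub_predictions
-- ===== SOURCE A (Python) =====
-- def get_sub_predictions(y_test, y_pred):
--     # where y_test is 0
--     where_y_test_0 = [index for index, g_truth in enumerate(y_test) if g_truth == 0]
--     y_pred_0 = [y_pred[index] for index in where_y_test_0]
--     y_test_0 = [0] * len(y_pred_0)
--
--     # where y_test is 1
--     where_y_test_1 = [index for index, g_truth in enumerate(y_test) if g_truth == 1]
--     y_pred_1 = [y_pred[index] for index in where_y_test_1]
--     y_test_1 = [1] * len(y_pred_1)
--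
--     return y_pred_0, y_test_0, y_pred_1, y_test_1
-- ===== SOURCE B (Python) =====
-- def get_sub_predictions(y_test, y_pred):
--     # single pass over the paired sequences, dispatching on the true label
--     y_pred_0, y_test_0, y_pred_1, y_test_1 = [], [], [], []
--     for g, p in zip(y_test, y_pred):
--         if g == 0:
--             y_pred_0.append(p)
--             y_test_0.append(0)
--         elif g == 1:
--             y_pred_1.append(p)
--             y_test_1.append(1)
--     return y_pred_0, y_test_0, y_pred_1, y_test_1
-- ===== Notes on version B (the rewrite author's own statement) =====
-- stated objective: simpler
-- what changed: Replaces A's two index-gathering scans over enumerate(y_test) plus indexed lookups into y_pred by one zip pass that dispatches each (label, prediction) pair into the four output lists.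
import Mathlib
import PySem

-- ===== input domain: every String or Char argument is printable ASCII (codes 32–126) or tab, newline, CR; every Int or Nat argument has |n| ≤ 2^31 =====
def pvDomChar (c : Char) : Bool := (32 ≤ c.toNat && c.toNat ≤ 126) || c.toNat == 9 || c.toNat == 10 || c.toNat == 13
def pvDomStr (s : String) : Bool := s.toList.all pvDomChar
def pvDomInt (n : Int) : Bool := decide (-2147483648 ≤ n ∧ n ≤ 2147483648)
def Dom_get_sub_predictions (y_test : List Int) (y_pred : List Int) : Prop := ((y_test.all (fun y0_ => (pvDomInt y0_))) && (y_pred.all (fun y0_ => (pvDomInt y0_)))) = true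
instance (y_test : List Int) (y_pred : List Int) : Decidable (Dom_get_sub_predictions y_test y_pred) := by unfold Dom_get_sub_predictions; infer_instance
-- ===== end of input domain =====

-- B replaces A's two index-gathering scans over enumerate(y_test) (plus lookups y_pred[i])
-- by one zip pass dispatching each (label, prediction) pair into the four result lists (objective: simpler).

-- ===== PORT A =====
-- y_pred[index] is PySem.List.pyGetD (the `none`/IndexError case is excluded by Pre_).
def get_sub_predictions (y_test : List Int) (y_pred : List Int) : List Int × List Int × List Int × List Int :=
  let where_y_test_0 := ((PySem.List.enumerate y_test).filter (fun ig => ig.2 == 0)).map (fun ig => ig.1)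
  let y_pred_0 := where_y_test_0.map (fun index => PySem.List.pyGetD y_pred index 0)
  let y_test_0 := List.replicate y_pred_0.length (0 : Int)
  let where_y_test_1 := ((PySem.List.enumerate y_test).filter (fun ig => ig.2 == 1)).map (fun ig => ig.1)
  let y_pred_1 := where_y_test_1.map (fun index => PySem.List.pyGetD y_pred index 0)
  let y_test_1 := List.replicate y_pred_1.length (1 : Int)
  (y_pred_0, y_test_0, y_pred_1, y_test_1)

-- ===== PORT B =====
def get_sub_predictions_alt (y_test : List Int) (y_pred : List Int) : List Int × List Int × List Int × List Int :=
  (y_test.zip y_pred).foldl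
    (fun acc gp =>
      if gp.1 == 0 then (acc.1 ++ [gp.2], acc.2.1 ++ [0], acc.2.2.1, acc.2.2.2)
      else if gp.1 == 1 then (acc.1, acc.2.1, acc.2.2.1 ++ [gp.2], acc.2.2.2 ++ [1])
      else acc)
    ([], [], [], [])

-- ===== PRECONDITION & SPEC =====
-- Pre_ excludes exactly the inputs where A raises IndexError: a label 0 or 1 at an index out of range for y_pred.
def Pre_get_sub_predictions (y_test : List Int) (y_pred : List Int) : Prop :=
  ∀ i : Nat, (h : i < y_test.length) → (y_test[i] = 0 ∨ y_test[i] = 1) → i < y_pred.length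
instance (y_test : List Int) (y_pred : List Int) : Decidable (Pre_get_sub_predictions y_test y_pred) := by unfold Pre_get_sub_predictions; infer_instance
def pvWitness_get_sub_predictions : List Int × List Int := ([0, 1, 2, 0], [10, 11, 12, 13])


def Spec_get_sub_predictions (y_test : List Int) (y_pred : List Int) (out : List Int × List Int × List Int × List Int) : Prop := out = get_sub_predictions_alt y_test y_pred
instance (y_test : List Int) (y_pred : List Int) (out : List Int × List Int × List Int × List Int) : Decidable (Spec_get_sub_predictions y_test y_pred out) := by unfold Spec_get_sub_predictions; infer_instance

-- ===== CLAIM (what is proved, stated in full; the proofs are below) =====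
def Claim_equal_get_sub_predictions : Prop := ∀ (y_test : List Int) (y_pred : List Int), Dom_get_sub_predictions y_test y_pred → Pre_get_sub_predictions y_test y_pred → Spec_get_sub_predictions y_test y_pred (get_sub_predictions y_test y_pred)

-- ===== LEMMAS AND PROOFS =====

-- enumerate with a shifted start is a fst-shift of enumerate from the original start
lemma enumerate_shift (t : List Int) (s : Int) :
    PySem.List.enumerate t (s + 1) = (PySem.List.enumerate t s).map (fun ip => (ip.1 + 1, ip.2)) := by
  induction t generalizing s with
  | nil => simp [PySem.List.enumerate_nil]
  | cons x xs ih => simp [PySem.List.enumerate_cons, ih]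

-- if no element of t equals c, the c-filter of its enumeration is empty
lemma filter_enumerate_nil {t : List Int} {c : Int} (h : ∀ y ∈ t, y ≠ c) (s : Int) :
    (PySem.List.enumerate t s).filter (fun ig => ig.2 == c) = [] := by
  rw [List.filter_eq_nil_iff]
  intro ig hig
  have : ig.2 ∈ (PySem.List.enumerate t s).map (fun ip => ip.2) := List.mem_map_of_mem hig
  rw [PySem.List.map_snd_enumerate] at this
  simpa using h ig.2 this

-- shifting the indices by one and looking up in (q :: ps) = looking up the unshifted indices in ps
lemma mapidx_shift (xs ps : List Int) (q c : Int) :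
    ((((PySem.List.enumerate xs 0).map (fun ip => (ip.1 + 1, ip.2))).filter (fun ig => ig.2 == c)).map
        (fun ig => ig.1)).map (fun index => PySem.List.pyGetD (q :: ps) index 0)
      = (((PySem.List.enumerate xs 0).filter (fun ig => ig.2 == c)).map (fun ig => ig.1)).map
        (fun index => PySem.List.pyGetD ps index 0) := by
  rw [List.filter_map, List.map_map, List.map_map, List.map_map]
  apply List.map_congr_left
  intro ig hig
  have hmem := List.mem_of_mem_filter hig
  have hnn : 0 ≤ ig.1 := by
    have : ig.1 ∈ (PySem.List.enumerate xs 0).map (fun ip => ip.1) := List.mem_map_of_mem hmem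
    rw [PySem.List.map_fst_enumerate] at this
    exact (PySem.List.mem_pyRange_one.mp (by simpa using this)).1
  simp only [Function.comp]
  rw [PySem.List.pyGetD_of_nonneg (q :: ps) (i := ig.1 + 1) 0 (by omega),
      PySem.List.pyGetD_of_nonneg ps (i := ig.1) 0 hnn]
  have ht : (ig.1 + 1).toNat = ig.1.toNat + 1 := by omega
  simp [ht]

-- A's gather (for a fixed class c) equals the zip filter-map, given every c-labelled index is in range
lemma gather_eq_zip (c : Int) :
    ∀ (t p : List Int), (∀ i : Nat, (h : i < t.length) → t[i] = c → i < p.length) →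
    (((PySem.List.enumerate t).filter (fun ig => ig.2 == c)).map (fun ig => ig.1)).map
        (fun index => PySem.List.pyGetD p index 0)
      = ((t.zip p).filter (fun gp => gp.1 == c)).map (fun gp => gp.2) := by
  intro t
  induction t with
  | nil => intro p _; simp [PySem.List.enumerate_nil]
  | cons x xs ih =>
    intro p hp
    cases p with
    | nil =>
      have hnone : ∀ y ∈ x :: xs, y ≠ c := by
        intro y hy hyc
        obtain ⟨i, hi, rfl⟩ := List.getElem_of_mem hy
        exact absurd (hp i hi hyc) (by simp)
      rw [List.zip_nil_right, filter_enumerate_nil hnone 0]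
      simp
    | cons q ps =>
      have htail : ∀ i : Nat, (h : i < xs.length) → xs[i] = c → i < ps.length := by
        intro i hi hic
        have := hp (i + 1) (by simp [List.length_cons]; omega) (by simpa using hic)
        simp [List.length_cons] at this
        omega
      rw [PySem.List.enumerate_cons, enumerate_shift xs 0, List.filter_cons,
          List.zip_cons_cons, List.filter_cons]
      by_cases hx : x = c
      · simp only [hx, beq_self_eq_true, if_true, List.map_cons]
        rw [PySem.List.pyGetD_zero_cons, mapidx_shift, ih ps htail]
      · have hxc : (x == c) = false := by simp [hx]
        simp only [hxc, Bool.false_eq_true, if_false]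
        rw [mapidx_shift, ih ps htail]

-- B's foldl with append accumulators, characterised
lemma foldB (zs : List (Int × Int)) :
    ∀ (a b c d : List Int),
      zs.foldl
        (fun acc gp =>
          if gp.1 == 0 then (acc.1 ++ [gp.2], acc.2.1 ++ [0], acc.2.2.1, acc.2.2.2)
          else if gp.1 == 1 then (acc.1, acc.2.1, acc.2.2.1 ++ [gp.2], acc.2.2.2 ++ [1])
          else acc)
        (a, b, c, d)
      = (a ++ (zs.filter (fun gp => gp.1 == 0)).map (fun gp => gp.2),
         b ++ (zs.filter (fun gp => gp.1 == 0)).map (fun _ => (0 : Int)),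
         c ++ (zs.filter (fun gp => gp.1 == 1)).map (fun gp => gp.2),
         d ++ (zs.filter (fun gp => gp.1 == 1)).map (fun _ => (1 : Int))) := by
  induction zs with
  | nil => intro a b c d; simp
  | cons gp zs ih =>
    intro a b c d
    rw [List.foldl_cons, List.filter_cons, List.filter_cons]
    by_cases h0 : gp.1 = 0
    · have e : (if gp.1 == 0 then ((a, b, c, d).1 ++ [gp.2], (a, b, c, d).2.1 ++ [0], (a, b, c, d).2.2.1, (a, b, c, d).2.2.2)
             else if gp.1 == 1 then ((a, b, c, d).1, (a, b, c, d).2.1, (a, b, c, d).2.2.1 ++ [gp.2], (a, b, c, d).2.2.2 ++ [1])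
             else (a, b, c, d)) = (a ++ [gp.2], b ++ [0], c, d) := by simp [h0]
      rw [e, ih]
      simp [h0]
    · by_cases h1 : gp.1 = 1
      · have e : (if gp.1 == 0 then ((a, b, c, d).1 ++ [gp.2], (a, b, c, d).2.1 ++ [0], (a, b, c, d).2.2.1, (a, b, c, d).2.2.2)
               else if gp.1 == 1 then ((a, b, c, d).1, (a, b, c, d).2.1, (a, b, c, d).2.2.1 ++ [gp.2], (a, b, c, d).2.2.2 ++ [1])
               else (a, b, c, d)) = (a, b, c ++ [gp.2], d ++ [1]) := by simp [h0, h1]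
        rw [e, ih]
        simp [h1]
      · have e : (if gp.1 == 0 then ((a, b, c, d).1 ++ [gp.2], (a, b, c, d).2.1 ++ [0], (a, b, c, d).2.2.1, (a, b, c, d).2.2.2)
               else if gp.1 == 1 then ((a, b, c, d).1, (a, b, c, d).2.1, (a, b, c, d).2.2.1 ++ [gp.2], (a, b, c, d).2.2.2 ++ [1])
               else (a, b, c, d)) = (a, b, c, d) := by simp [h0, h1]
        rw [e, ih]
        simp [h0, h1]

-- replicate the length of a mapped list = constant map over the same list
lemma replicate_len_map (l : List (Int × Int)) (v : Int) :
    List.replicate ((l.map (fun gp => gp.2)).length) v = l.map (fun _ => v) := by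
  induction l with
  | nil => rfl
  | cons x xs ih => simp [List.replicate_succ, ← ih]

-- ===== VERDICT (by name: the statement is the Claim_ definition above) =====
theorem get_sub_predictions_spec : Claim_equal_get_sub_predictions := by
  intro t p _ hpre
  unfold Spec_get_sub_predictions get_sub_predictions get_sub_predictions_alt
  rw [foldB]
  have h0 := gather_eq_zip 0 t p (fun i h hi => hpre i h (Or.inl hi))
  have h1 := gather_eq_zip 1 t p (fun i h hi => hpre i h (Or.inr hi))
  simp only [List.nil_append, h0, h1, replicate_len_map]
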